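-- pv_equiv track=rewrite | github.com/simoll/apo | plot.py | filterImprovements
-- ===== SOURCE A (Python) =====
-- def filterImprovements(X,Y):
--   outX = [X[0]]
--   outY = [Y[0]]
--   bestY= outY[0]
--   for x,y in zip(X,Y):
--     if y > bestY:
--       outX.append(x)
--       outY.append(y)
--       bestY = y
--   return outX, outY
-- ===== SOURCE B (Python) =====
-- def filterImprovements(X, Y):
--   n = min(len(X), len(Y))
--   rm = []
--   m = Y[0]
--   for y in Y[:n]:
--     if y > m:
--       m = y
--     rm.append(m)
--   outX = [X[0]]
--   outY = [Y[0]]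
--   for x, y, p in zip(X[1:n], Y[1:n], rm):
--     if y > p:
--       outX.append(x)
--       outY.append(y)
--   return outX, outY
-- ===== Notes on version B (the rewrite author's own statement) =====
-- stated objective: alternative
-- what changed: A's single scan carrying (outX,outY,bestY) is replaced by two passes: first build a prefix running-maximum table over Y, then select (x,y) pairs by comparing each y against the table entry for the previous index.
import Mathlib
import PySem

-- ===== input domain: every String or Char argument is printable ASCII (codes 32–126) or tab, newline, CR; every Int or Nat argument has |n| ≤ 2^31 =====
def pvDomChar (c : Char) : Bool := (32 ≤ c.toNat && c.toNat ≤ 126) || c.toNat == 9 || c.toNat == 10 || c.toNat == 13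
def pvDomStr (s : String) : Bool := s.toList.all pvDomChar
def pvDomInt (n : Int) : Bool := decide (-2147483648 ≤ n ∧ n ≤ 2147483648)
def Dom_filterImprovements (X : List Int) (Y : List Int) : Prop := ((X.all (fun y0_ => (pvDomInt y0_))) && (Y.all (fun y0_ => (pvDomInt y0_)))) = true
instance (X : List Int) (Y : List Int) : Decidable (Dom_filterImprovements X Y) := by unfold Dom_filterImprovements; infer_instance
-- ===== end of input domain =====

-- B replaces A's single accumulator scan by two passes: a prefix running-maximum table, then an index-aligned selection pass (objective: alternative decomposition, same cost).

-- ===== PORT A =====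
-- A's loop body: state (outX, outY, bestY), one zip pair per step.
def stepA (s : List Int × List Int × Int) (p : Int × Int) : List Int × List Int × Int :=
  if p.2 > s.2.2 then (s.1 ++ [p.1], s.2.1 ++ [p.2], p.2) else s

def filterImprovements (X : List Int) (Y : List Int) : List Int × List Int :=
  match PySem.List.pyGet? X 0, PySem.List.pyGet? Y 0 with
  | some x0, some y0 =>
    let s := (X.zip Y).foldl stepA ([x0], [y0], y0)
    (s.1, s.2.1)
  | _, _ => ([], [])   -- Python raises IndexError here; excluded by Pre_

-- ===== PORT B =====
-- first pass of Source B: running maximum with A's '>' comparison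
def rmScan (m : Int) : List Int → List Int
  | [] => []
  | y :: ys => let m' := if y > m then y else m
               m' :: rmScan m' ys

-- second pass of Source B: select (x, y, prevMax) triples with y > prevMax
def stepB (s : List Int × List Int) (t : Int × Int × Int) : List Int × List Int :=
  if t.2.1 > t.2.2 then (s.1 ++ [t.1], s.2 ++ [t.2.1]) else s

def filterImprovements_alt (X : List Int) (Y : List Int) : List Int × List Int :=
  match X, Y with            -- Y[0] / X[0]: defined only on nonempty lists (Pre_)
  | x0 :: _, y0 :: _ =>
    let n : Int := min (X.length : Int) (Y.length : Int)
    let rm := rmScan y0 (PySem.List.slice Y (some 0) (some n))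
    ((PySem.List.slice X (some 1) (some n)).zip
      ((PySem.List.slice Y (some 1) (some n)).zip rm)).foldl stepB ([x0], [y0])
  | _, _ => ([], [])   -- Python raises IndexError here; excluded by Pre_

-- ===== PRECONDITION & SPEC =====
-- Python A raises IndexError on X[0]/Y[0] when either list is empty; both programs raise there.
def Pre_filterImprovements (X : List Int) (Y : List Int) : Prop := X ≠ [] ∧ Y ≠ []
instance (X : List Int) (Y : List Int) : Decidable (Pre_filterImprovements X Y) := by unfold Pre_filterImprovements; infer_instance
def pvWitness_filterImprovements : List Int × List Int := ([1, 2, 3], [5, 4, 7])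

def Spec_filterImprovements (X : List Int) (Y : List Int) (out : List Int × List Int) : Prop := out = filterImprovements_alt X Y
instance (X : List Int) (Y : List Int) (out : List Int × List Int) : Decidable (Spec_filterImprovements X Y out) := by unfold Spec_filterImprovements; infer_instance

-- ===== CLAIM (what is proved, stated in full; the proofs are below) =====
def Claim_equal_filterImprovements : Prop := ∀ (X : List Int) (Y : List Int), Dom_filterImprovements X Y → Pre_filterImprovements X Y → Spec_filterImprovements X Y (filterImprovements X Y)

-- ===== LEMMAS AND PROOFS =====

lemma map_fst_zip_take (X Y : List Int) :
    (X.zip Y).map Prod.fst = X.take (min X.length Y.length) := by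
  induction X generalizing Y with
  | nil => simp
  | cons x xs ih =>
    cases Y with
    | nil => simp
    | cons y ys => simp [ih, Nat.succ_min_succ]

lemma map_snd_zip_take (X Y : List Int) :
    (X.zip Y).map Prod.snd = Y.take (min X.length Y.length) := by
  induction X generalizing Y with
  | nil => simp
  | cons x xs ih =>
    cases Y with
    | nil => simp
    | cons y ys => simp [ih, Nat.succ_min_succ]

-- A's accumulator scan equals B's table-then-select pass, for any start state.
lemma key (ps : List (Int × Int)) (m : Int) (oX oY : List Int) :
    (let s := ps.foldl stepA (oX, oY, m); (s.1, s.2.1))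
      = ((ps.map Prod.fst).zip ((ps.map Prod.snd).zip
          (m :: rmScan m (ps.map Prod.snd)))).foldl stepB (oX, oY) := by
  induction ps generalizing m oX oY with
  | nil => simp
  | cons p ps ih =>
    obtain ⟨x, y⟩ := p
    by_cases h : y > m
    · simpa [stepA, stepB, rmScan, h] using ih y (oX ++ [x]) (oY ++ [y])
    · simpa [stepA, stepB, rmScan, h] using ih m oX oY

-- ===== VERDICT (by name: the statement is the Claim_ definition above) =====
theorem filterImprovements_spec : Claim_equal_filterImprovements := by
  intro X Y _ hpre
  obtain ⟨hX, hY⟩ := hpre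
  obtain ⟨x0, xs, rfl⟩ := List.exists_cons_of_ne_nil hX
  obtain ⟨y0, ys, rfl⟩ := List.exists_cons_of_ne_nil hY
  unfold Spec_filterImprovements filterImprovements filterImprovements_alt
  simp only [PySem.List.pyGet?, PySem.List.pyIdx?]
  norm_num
  have hnn : (0:Int) ≤ min (xs.length : Int) (ys.length : Int) + 1 := by omega
  have htn : (min (xs.length : Int) (ys.length : Int) + 1).toNat
      = min xs.length ys.length + 1 := by omega
  have hX1 : PySem.List.slice (x0 :: xs) (some 1)
      (some (min (xs.length : Int) (ys.length : Int) + 1))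
      = xs.take (min xs.length ys.length) := by
    rw [PySem.List.slice_toNat _ (by omega) hnn, htn]; simp
  have hY1 : PySem.List.slice (y0 :: ys) (some 1)
      (some (min (xs.length : Int) (ys.length : Int) + 1))
      = ys.take (min xs.length ys.length) := by
    rw [PySem.List.slice_toNat _ (by omega) hnn, htn]; simp
  have hY0 : PySem.List.slice (y0 :: ys) none
      (some (min (xs.length : Int) (ys.length : Int) + 1))
      = y0 :: ys.take (min xs.length ys.length) := by
    rw [PySem.List.slice_to _ hnn, htn]; simp
  rw [hX1, hY1, hY0]
  have hrm : rmScan y0 (y0 :: ys.take (min xs.length ys.length))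
      = y0 :: rmScan y0 (ys.take (min xs.length ys.length)) := by simp [rmScan]
  rw [hrm]
  have hstep : stepA ([x0], [y0], y0) (x0, y0) = ([x0], [y0], y0) := by simp [stepA]
  rw [hstep]
  have hkey := key (xs.zip ys) y0 [x0] [y0]
  rw [map_fst_zip_take, map_snd_zip_take] at hkey
  simpa using hkey
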